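-- pv_equiv track=rewrite | github.com/shadibdair/BSc-CS-Codes | python-x1/main.py | mult_with_transpose
-- ===== SOURCE A (Python) =====
-- def mult_with_transpose(A):
--     ## if A is list
--     if isinstance(A, list):
--         ## initialize matrix
--         result = []
--         ## loop over rows of A
--         for i in range(len(A)):
--             row_result = []
--             ## loop over columns of A
--             for j in range(len(A)):
--                 sum = 0
--                 ## multiplication
--                 for k in range(len(A[0])):
--                     if j < len(A) and k < len(A[0]):
--                         sum += A[i][k] * A[j][k]
--                 row_result.append(sum)
--             result.append(row_result)
--         return result
--
--     ## if A is dictionary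
--     elif isinstance(A, dict):
--         ## initialize dictionary
--         result = {}
--         ## size of the matrix
--         size = max(max(key) for key in A.keys())
--         ## loop over rows
--         for i in range(1, size + 1):
--             ## loop over columns
--             for j in range(1, size + 1):
--                 sum = 0
--                 ## multiplication
--                 for k in range(1, size + 1):
--                     sum += A.get((i, k), 0) * A.get((j, k), 0)
--                 result[(i, j)] = sum
--         return result
-- ===== SOURCE B (Python) =====
-- def mult_with_transpose(A):
--     ## list branch: build each row from the already-computed transpose part
--     ## plus fresh dot products for the upper triangle (Gram matrix is symmetric)
--     if isinstance(A, list):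
--         n = len(A)
--         m = len(A[0]) if A else 0
--         rows = []
--         for i in range(n):
--             row = [rows[j][i] for j in range(i)]
--             row += [sum(A[i][k] * A[j][k] for k in range(m)) for j in range(i, n)]
--             rows.append(row)
--         return rows
--     ## dict branch: triangular fill, mirroring each dot product
--     elif isinstance(A, dict):
--         result = {}
--         size = max(max(key) for key in A.keys())
--         for i in range(1, size + 1):
--             for j in range(i, size + 1):
--                 s = sum(A.get((i, k), 0) * A.get((j, k), 0) for k in range(1, size + 1))
--                 result[(i, j)] = s
--                 result[(j, i)] = s
--         return result
-- ===== Notes on version B (the rewrite author's own statement) =====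
-- stated objective: alternative
-- what changed: B exploits the symmetry of A*A^T: each row is assembled by reading its left part from the transpose entries of already-built rows and computing dot products only for the upper triangle, instead of A's full n-by-n triple loop with a redundant bounds guard.
import Mathlib
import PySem

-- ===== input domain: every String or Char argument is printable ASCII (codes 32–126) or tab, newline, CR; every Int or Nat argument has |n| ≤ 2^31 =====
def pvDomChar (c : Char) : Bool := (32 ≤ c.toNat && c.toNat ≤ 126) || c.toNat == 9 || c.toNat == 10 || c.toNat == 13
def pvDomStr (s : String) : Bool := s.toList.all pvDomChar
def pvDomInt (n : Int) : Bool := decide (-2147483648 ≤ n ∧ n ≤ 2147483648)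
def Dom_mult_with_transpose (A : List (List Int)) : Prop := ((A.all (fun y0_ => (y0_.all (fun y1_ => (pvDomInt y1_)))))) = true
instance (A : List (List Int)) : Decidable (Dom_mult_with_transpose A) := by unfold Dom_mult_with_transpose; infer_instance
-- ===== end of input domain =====

-- B builds each Gram-matrix row from the transpose entries of already-built rows plus
-- fresh dot products for the upper triangle only (alternative decomposition, ~half the dot products).

-- ===== PORT A =====
-- Python A[i][k]: every index produced by the range() loops is in range whenever
-- Pre_mult_with_transpose holds, so indexing is ported as getD (exact on Pre_).
def pvIdx (A : List (List Int)) (i k : Nat) : Int := (A.getD i []).getD k 0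

def mult_with_transpose (A : List (List Int)) : List (List Int) :=
  (List.range A.length).foldl (fun result i =>
    result ++ [(List.range A.length).foldl (fun row_result j =>
      row_result ++ [(List.range (A.headD []).length).foldl (fun sum k =>
        if j < A.length ∧ k < (A.headD []).length then
          sum + pvIdx A i k * pvIdx A j k
        else sum) 0]) []]) []

-- ===== PORT B =====
-- rows[j][i] with j < i < len(rows[j]) is in range by construction: ported as getD (exact).
-- range(i, n) with i ≤ n is ported as List.range' i (n - i) (exact for 0 ≤ i ≤ n).
def mult_with_transpose_alt (A : List (List Int)) : List (List Int) :=
  let n := A.length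
  let m := (A.headD []).length
  (List.range n).foldl (fun rows i =>
    rows ++ [((List.range i).map (fun j => (rows.getD j []).getD i 0)) ++
             ((List.range' i (n - i)).map (fun j =>
               (List.range m).foldl (fun s k => s + pvIdx A i k * pvIdx A j k) 0))]) []

-- ===== PRECONDITION & SPEC =====
-- Pre_ excludes exactly the ragged inputs on which Python A raises IndexError:
-- some row shorter than the first row (A indexes every row up to len(A[0])).
def Pre_mult_with_transpose (A : List (List Int)) : Prop :=
  ∀ row ∈ A, (A.headD []).length ≤ row.length
instance (A : List (List Int)) : Decidable (Pre_mult_with_transpose A) := by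
  unfold Pre_mult_with_transpose; infer_instance

def pvWitness_mult_with_transpose : List (List Int) := [[1, 2], [3, 4]]

def Spec_mult_with_transpose (A : List (List Int)) (out : List (List Int)) : Prop := out = mult_with_transpose_alt A
instance (A : List (List Int)) (out : List (List Int)) : Decidable (Spec_mult_with_transpose A out) := by unfold Spec_mult_with_transpose; infer_instance

-- ===== CLAIM (what is proved, stated in full; the proofs are below) =====
def Claim_equal_mult_with_transpose : Prop := ∀ (A : List (List Int)), Dom_mult_with_transpose A → Pre_mult_with_transpose A → Spec_mult_with_transpose A (mult_with_transpose A)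

-- ===== LEMMAS AND PROOFS =====

/-- The dot product of (the first `len A[0]` entries of) rows `i` and `j`. -/
def pvDot (A : List (List Int)) (i j : Nat) : Int :=
  (List.range (A.headD []).length).foldl (fun s k => s + pvIdx A i k * pvIdx A j k) 0

def pvRow (A : List (List Int)) (i : Nat) : List Int :=
  (List.range A.length).map (pvDot A i)

theorem pv_foldl_append_singleton {α β : Type} (l : List α) (f : α → β) (acc : List β) :
    l.foldl (fun acc x => acc ++ [f x]) acc = acc ++ l.map f := by
  induction l generalizing acc with
  | nil => simp
  | cons x xs ih => simp [List.foldl_cons, ih]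

theorem pv_foldl_add {α : Type} (l : List α) (f : α → Int) (s : Int) :
    l.foldl (fun s k => s + f k) s = s + (l.map f).sum := by
  induction l generalizing s with
  | nil => simp
  | cons x xs ih => simp [List.foldl_cons, ih]; ring

theorem pvDot_symm (A : List (List Int)) (i j : Nat) : pvDot A i j = pvDot A j i := by
  unfold pvDot
  rw [pv_foldl_add, pv_foldl_add]
  congr 1
  exact congrArg List.sum (List.map_congr_left fun k _ => mul_comm _ _)

theorem pv_foldl_congr {α β : Type} (l : List α) (f g : β → α → β) (init : β)
    (h : ∀ b a, a ∈ l → f b a = g b a) : l.foldl f init = l.foldl g init := by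
  induction l generalizing init with
  | nil => rfl
  | cons x xs ih => simp only [List.foldl_cons, h _ _ (List.mem_cons_self ..)]; exact ih _ fun b a ha => h b a (List.mem_cons_of_mem _ ha)

theorem pv_inner_eq (A : List (List Int)) (i j : Nat) (hj : j < A.length) :
    (List.range (A.headD []).length).foldl (fun sum k =>
        if j < A.length ∧ k < (A.headD []).length then
          sum + pvIdx A i k * pvIdx A j k
        else sum) 0 = pvDot A i j := by
  unfold pvDot
  exact pv_foldl_congr _ _ _ _ fun s k hk => if_pos ⟨hj, List.mem_range.mp hk⟩

theorem portA_eq (A : List (List Int)) :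
    mult_with_transpose A = (List.range A.length).map (pvRow A) := by
  unfold mult_with_transpose
  rw [pv_foldl_append_singleton]
  simp only [List.nil_append]
  refine List.map_congr_left fun i _ => ?_
  rw [pv_foldl_append_singleton]
  simp only [List.nil_append]
  unfold pvRow
  refine List.map_congr_left fun j hj => ?_
  exact pv_inner_eq A i j (List.mem_range.mp hj)

theorem portB_build (A : List (List Int)) (t : Nat) (ht : t ≤ A.length) :
    (List.range t).foldl (fun rows i =>
      rows ++ [((List.range i).map (fun j => (rows.getD j []).getD i 0)) ++
               ((List.range' i (A.length - i)).map (fun j =>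
                 (List.range (A.headD []).length).foldl
                   (fun s k => s + pvIdx A i k * pvIdx A j k) 0))]) []
    = (List.range t).map (pvRow A) := by
  induction t with
  | zero => simp
  | succ t ih =>
    have ht' : t ≤ A.length := Nat.le_of_succ_le ht
    have htn : t < A.length := ht
    rw [List.range_succ, List.foldl_append, ih ht', List.map_append]
    simp only [List.foldl_cons, List.foldl_nil, List.map_cons, List.map_nil]
    congr 1
    -- the new row equals pvRow A t
    have hpre : (List.range t).map
        (fun j => (((List.range t).map (pvRow A)).getD j []).getD t 0)
        = (List.range t).map (pvDot A t) := by
      refine List.map_congr_left fun j hj => ?_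
      have hjt : j < t := List.mem_range.mp hj
      have h1 : ((List.range t).map (pvRow A)).getD j [] = pvRow A j := by
        rw [List.getD_eq_getElem _ _ (by simpa using hjt)]
        simp
      rw [h1]
      have h2 : (pvRow A j).getD t 0 = pvDot A j t := by
        unfold pvRow
        rw [List.getD_eq_getElem _ _ (by simpa using htn)]
        simp
      rw [h2, pvDot_symm]
    have hsuf : (List.range' t (A.length - t)).map (fun j =>
        (List.range (A.headD []).length).foldl
          (fun s k => s + pvIdx A t k * pvIdx A j k) 0)
        = (List.range' t (A.length - t)).map (pvDot A t) := rfl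
    rw [hpre, hsuf]
    unfold pvRow
    rw [← List.map_append]
    congr 1
    rw [List.range_eq_range', List.range_eq_range']
    have h := @List.range'_append 0 t (A.length - t) 1
    simp only [Nat.one_mul, Nat.zero_add] at h
    rw [h, Nat.add_sub_cancel' ht']

theorem portB_eq (A : List (List Int)) :
    mult_with_transpose_alt A = (List.range A.length).map (pvRow A) := by
  unfold mult_with_transpose_alt
  exact portB_build A A.length le_rfl

-- ===== VERDICT (by name: the statement is the Claim_ definition above) =====
theorem mult_with_transpose_spec : Claim_equal_mult_with_transpose := by
  intro A _ _
  unfold Spec_mult_with_transpose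
  rw [portA_eq, portB_eq]
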